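/- GENERATED by farm/mkstatement.py from design/units.tsv (unit `DGifGetImageHeader.5`) and the assertions of Gif/Spec/Seg_DGifGetImageHeader.lean — do not edit.
   THE STATEMENT of the proof unit `DGifGetImageHeader.5`: segment 5 of `DGifGetImageHeader` (38 instructions; entries 0x10902f;
   exits 0x108ffe; ranges 0x10902f-0x1090ce)
   takes each of its entry assertions to one of its exit assertions (`Gif.Spec.DGifGetImageHeader.Seg5`), given the contracts of its callees.
   What the names mean: ProgX/Base/Spec/Basic.lean (the shared hypotheses), Gif/Spec/Seg_DGifGetImageHeader.lean (the assertions). The theorem to prove: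
   `theorem DGifGetImageHeader_5_ok : Gif.Spec.DGifGetImageHeader_5.Statement`. -/
import Gif.Code
import Gif.Dec.All
import Gif.Labels
import Gif.Spec.Seg_DGifGetImageHeader
namespace Gif.Spec.DGifGetImageHeader_5
open X86 X86.User Asan

/-- The statement of unit `DGifGetImageHeader.5`. -/
def Statement : Prop :=
  ∀ (Lay : Layout) (_hLay : Lay.hi = 0x1000000) (μ : Microarch) (_hμ : UserX.MicroOK μ) (u₀ : State)
    (_hcode : HasCodeNat Lay u₀ Gif.L.DGifGetImageHeader.entry Gif.Code.code_DGifGetImageHeader.nat Gif.L.DGifGetImageHeader.size)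
    (_h_asan_load8_noabort : Asan.SmallCheck Lay μ ProgX.Base.WayInv (ProgX.Base.CodeOK u₀) [.rax, .rcx, .rdx] 8 ProgX.Base.L.__asan_load8_noabort.entry)
    (_h_asan_store1_noabort : Asan.SmallCheck Lay μ ProgX.Base.WayInv (ProgX.Base.CodeOK u₀) [.rax, .rdx] 1 ProgX.Base.L.__asan_store1_noabort.entry),
    Gif.Spec.DGifGetImageHeader.Seg5 Lay μ u₀

end Gif.Spec.DGifGetImageHeader_5
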